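-- pv_equiv track=rewrite | github.com/chrisc66/microservice-analysis | src/repo_finder.py | _has_required_infrastructure
-- ===== SOURCE A (Python) =====
-- from typing import List, Dict, Set, Optional, Generator
--
-- def _has_required_infrastructure(paths: Set[str]) -> bool:
--     """Check if the repository has required infrastructure components."""
--     # Infrastructure indicators
--     infra_indicators = {
--         'docker', 'kubernetes', 'k8s', 'helm',
--         'docker-compose', 'compose', 'deployment',
--         'manifests', 'config', 'prometheus',
--         'kube', 'deploy', 'ci', 'cd'
--     }
--
--     # Count infrastructure indicators
--     found_indicators = 0
--     for path in paths:
--         for indicator in infra_indicators: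
--             if indicator in path:
--                 found_indicators += 1
--                 if found_indicators >= 1:  # Only require one infrastructure indicator
--                     return True
--     return False
-- ===== SOURCE B (Python) =====
-- # NFA simulation: one left-to-right character scan per path maintaining the set
-- # of live pattern suffixes, instead of probing each indicator by substring test.
-- _INDICATORS = ['docker', 'kubernetes', 'k8s', 'helm',
--                'docker-compose', 'compose', 'deployment',
--                'manifests', 'config', 'prometheus',
--                'kube', 'deploy', 'ci', 'cd']
--
-- def _has_required_infrastructure(paths):
--     """Check if the repository has required infrastructure components."""
--     for path in paths:
--         active = []  # suffixes of indicators still matchable at this position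
--         for ch in path:
--             nxt = []
--             for s in active + _INDICATORS:
--                 if s[0] == ch:
--                     if len(s) == 1:
--                         return True
--                     nxt.append(s[1:])
--             active = nxt
--     return False
-- ===== Notes on version B (the rewrite author's own statement) =====
-- stated objective: alternative
-- what changed: B simulates a character-level NFA: one left-to-right scan per path that maintains the set of live indicator suffixes and reports a hit when a suffix is fully consumed, instead of A's nested loop probing each of the 14 indicators with a substring-containment test per path.
import Mathlib
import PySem

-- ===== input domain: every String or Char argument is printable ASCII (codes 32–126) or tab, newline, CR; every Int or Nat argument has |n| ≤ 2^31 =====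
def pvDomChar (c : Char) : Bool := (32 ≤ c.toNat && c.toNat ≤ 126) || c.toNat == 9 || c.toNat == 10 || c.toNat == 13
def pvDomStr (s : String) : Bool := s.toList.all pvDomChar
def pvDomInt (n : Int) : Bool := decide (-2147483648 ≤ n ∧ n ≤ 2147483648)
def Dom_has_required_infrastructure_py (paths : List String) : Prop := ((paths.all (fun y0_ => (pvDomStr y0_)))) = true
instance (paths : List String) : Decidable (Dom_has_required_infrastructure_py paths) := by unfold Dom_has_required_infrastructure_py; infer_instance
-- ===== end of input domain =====

-- B replaces A's per-indicator substring probes by a character-level NFA scan over each path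
-- (a set of live indicator suffixes, advanced one character at a time); objective: alternative.

-- ===== PORT A =====
-- the literal set of the Python source, in written order (the result is an OR, order-independent)
def pvIndicatorsA : List String :=
  ["docker", "kubernetes", "k8s", "helm", "docker-compose", "compose", "deployment",
   "manifests", "config", "prometheus", "kube", "deploy", "ci", "cd"]

-- the inner 'for indicator in infra_indicators' loop: .inr b = early 'return b', .inl f = loop ended with counter f
def pvInnerA : List String → String → Int → Int ⊕ Bool
  | [], _, found => .inl found
  | i :: rest, p, found =>
    if PySem.Str.isIn i p then
      let found' := found + 1
      if found' ≥ 1 then .inr true else pvInnerA rest p found'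
    else pvInnerA rest p found

-- the outer 'for path in paths' loop carrying found_indicators
def pvGoA : List String → Int → Bool
  | [], _ => false
  | p :: rest, found =>
    match pvInnerA pvIndicatorsA p found with
    | .inr b => b
    | .inl f => pvGoA rest f

def has_required_infrastructure_py (paths : List String) : Bool :=
  pvGoA paths 0

-- ===== PORT B =====
-- Source B's _INDICATORS; the port works over List Char (s[0] = head, s[1:] = tail, exact for these ASCII literals)
def pvInds : List (List Char) :=
  ["docker".toList, "kubernetes".toList, "k8s".toList, "helm".toList, "docker-compose".toList,
   "compose".toList, "deployment".toList, "manifests".toList, "config".toList,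
   "prometheus".toList, "kube".toList, "deploy".toList, "ci".toList, "cd".toList]

-- the 'for s in active + _INDICATORS' loop: none = early 'return True', some nxt = the built list
def pvExtend (c : Char) : List (List Char) → List (List Char) → Option (List (List Char))
  | [], acc => some acc
  | s :: rest, acc =>
    match s with
    | [] => pvExtend c rest acc   -- unreachable: stored suffixes are nonempty (Python s[0] would raise)
    | x :: xs =>
      if x == c then
        if xs.isEmpty then none else pvExtend c rest (acc ++ [xs])
      else pvExtend c rest acc

-- the 'for ch in path' loop carrying the active-suffix set
def pvScanPath (active : List (List Char)) : List Char → Bool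
  | [] => false
  | c :: cs =>
    match pvExtend c (active ++ pvInds) [] with
    | none => true
    | some nxt => pvScanPath nxt cs

-- the 'for path in paths' loop
def pvGoB : List String → Bool
  | [] => false
  | p :: rest => if pvScanPath [] p.toList then true else pvGoB rest

def has_required_infrastructure_py_alt (paths : List String) : Bool :=
  pvGoB paths

-- ===== PRECONDITION & SPEC =====
def Spec_has_required_infrastructure_py (paths : List String) (out : Bool) : Prop := out = has_required_infrastructure_py_alt paths
instance (paths : List String) (out : Bool) : Decidable (Spec_has_required_infrastructure_py paths out) := by unfold Spec_has_required_infrastructure_py; infer_instance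

-- ===== CLAIM (what is proved, stated in full; the proofs are below) =====
def Claim_equal_has_required_infrastructure_py : Prop := ∀ (paths : List String), Dom_has_required_infrastructure_py paths → Spec_has_required_infrastructure_py paths (has_required_infrastructure_py paths)

-- ===== LEMMAS AND PROOFS =====

-- what the inner candidate loop keeps: a live suffix advanced past c (dropped when fully consumed)
def pvKeep (c : Char) : List Char → Option (List Char)
  | [] => none
  | x :: xs => if x == c && !xs.isEmpty then some xs else none

theorem pvKeep_cons (c x : Char) (xs : List Char) :
    pvKeep c (x :: xs) = if x == c && !xs.isEmpty then some xs else none := rfl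

theorem pvExtend_eq (c : Char) : ∀ (L acc : List (List Char)),
    pvExtend c L acc =
      if [c] ∈ L then none else some (acc ++ L.filterMap (pvKeep c)) := by
  intro L
  induction L with
  | nil => intro acc; simp [pvExtend]
  | cons s rest ih =>
    intro acc
    cases s with
    | nil =>
      simp only [pvExtend]
      rw [ih, List.filterMap_cons_none (by rfl)]
      simp
    | cons x xs =>
      simp only [pvExtend]
      by_cases hx : x = c
      · subst hx
        rw [if_pos (by simp)]
        cases xs with
        | nil =>
          rw [if_pos (show ([] : List Char).isEmpty = true from rfl),
            if_pos (List.mem_cons_self)]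
        | cons y ys =>
          rw [if_neg (by simp), ih,
            List.filterMap_cons_some (show pvKeep x (x :: y :: ys) = some (y :: ys) by rw [pvKeep_cons]; simp)]
          by_cases hm : ([x] : List Char) ∈ rest
          · rw [if_pos hm, if_pos (List.mem_cons_of_mem _ hm)]
          · rw [if_neg hm, if_neg (by simp [hm])]
            simp
      · rw [if_neg (by simp [hx]), ih,
          List.filterMap_cons_none (by rw [pvKeep_cons]; simp [hx])]
        have hne : ([c] : List Char) ≠ x :: xs := by
          intro h; injection h with h1 _; exact hx h1.symm
        by_cases hm : ([c] : List Char) ∈ rest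
        · rw [if_pos hm, if_pos (List.mem_cons_of_mem _ hm)]
        · rw [if_neg hm, if_neg (by simp [hne, hm])]

theorem pvInds_nonempty : ∀ i ∈ pvInds, i ≠ [] := by decide

-- the NFA scan fires iff a live suffix is a prefix of the rest, or an indicator occurs inside it
theorem pvScanPath_iff : ∀ (cs : List Char) (active : List (List Char)),
    pvScanPath active cs = true ↔
      (∃ s ∈ active, s ≠ [] ∧ s <+: cs) ∨ (∃ i ∈ pvInds, i <:+: cs) := by
  intro cs
  induction cs with
  | nil =>
    intro active
    simp only [pvScanPath, Bool.false_eq_true, false_iff]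
    rintro (⟨s, _, hne, hp⟩ | ⟨i, hi, hinf⟩)
    · exact hne (List.prefix_nil.mp hp)
    · exact pvInds_nonempty i hi (List.infix_nil.mp hinf)
  | cons c cs' ih =>
    intro active
    show (match pvExtend c (active ++ pvInds) [] with
          | none => true
          | some nxt => pvScanPath nxt cs') = true ↔ _
    rw [pvExtend_eq]
    by_cases hmem : ([c] : List Char) ∈ active ++ pvInds
    · rw [if_pos hmem]
      constructor
      · intro _
        rcases List.mem_append.mp hmem with h | h
        · exact Or.inl ⟨[c], h, by simp, ⟨cs', rfl⟩⟩
        · exact Or.inr ⟨[c], h, ⟨[], cs', rfl⟩⟩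
      · intro _; rfl
    · rw [if_neg hmem]
      show pvScanPath ([] ++ (active ++ pvInds).filterMap (pvKeep c)) cs' = true ↔ _
      rw [List.nil_append, ih]
      have hnotc : ∀ s ∈ active ++ pvInds, s ≠ [c] := by
        intro s hs hc
        exact hmem (hc ▸ hs)
      constructor
      · rintro (⟨s, hs, _, hp⟩ | ⟨i, hi, hinf⟩)
        · obtain ⟨t, ht, hk⟩ := List.mem_filterMap.mp hs
          cases t with
          | nil => simp [pvKeep] at hk
          | cons x xs =>
            rw [pvKeep_cons] at hk
            by_cases hcnd : (x == c && !xs.isEmpty) = true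
            · rw [if_pos hcnd] at hk
              obtain ⟨hxc, _⟩ := Bool.and_eq_true_iff.mp hcnd
              have hxc : x = c := by simpa using hxc
              have hks : xs = s := by injection hk
              have hpre : x :: xs <+: c :: cs' := List.cons_prefix_cons.mpr ⟨hxc, hks ▸ hp⟩
              rcases List.mem_append.mp ht with h | h
              · exact Or.inl ⟨x :: xs, h, by simp, hpre⟩
              · exact Or.inr ⟨x :: xs, h, hpre.isInfix⟩
            · rw [if_neg hcnd] at hk
              exact absurd hk (by simp)
        · exact Or.inr ⟨i, hi, hinf.trans (List.suffix_cons c cs').isInfix⟩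
      · rintro (⟨s, hs, hne, hp⟩ | ⟨i, hi, hinf⟩)
        · cases s with
          | nil => exact absurd rfl hne
          | cons x xs =>
            obtain ⟨hxc, hxs⟩ := List.cons_prefix_cons.mp hp
            subst hxc
            have hxsne : xs ≠ [] := by
              intro h; subst h
              exact hnotc _ (List.mem_append_left _ hs) rfl
            refine Or.inl ⟨xs, List.mem_filterMap.mpr ⟨x :: xs, List.mem_append_left _ hs, ?_⟩, hxsne, hxs⟩
            rw [pvKeep_cons, if_pos (by simp [hxsne])]
        · rcases List.infix_cons_iff.mp hinf with hpre | hinf'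
          · cases i with
            | nil => exact absurd rfl (pvInds_nonempty [] hi)
            | cons x xs =>
              obtain ⟨hxc, hxs⟩ := List.cons_prefix_cons.mp hpre
              subst hxc
              have hxsne : xs ≠ [] := by
                intro h; subst h
                exact hnotc _ (List.mem_append_right _ hi) rfl
              refine Or.inl ⟨xs, List.mem_filterMap.mpr ⟨x :: xs, List.mem_append_right _ hi, ?_⟩, hxsne, hxs⟩
              rw [pvKeep_cons, if_pos (by simp [hxsne])]
          · exact Or.inr ⟨i, hi, hinf'⟩

-- A's inner loop starting at counter 0: early-returns true iff some indicator matches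
theorem pv_innerA_eq (inds : List String) (p : String) :
    pvInnerA inds p 0 = if inds.any (fun i => PySem.Str.isIn i p) then Sum.inr true else Sum.inl 0 := by
  induction inds with
  | nil => simp [pvInnerA]
  | cons i rest ih =>
    simp only [pvInnerA, List.any_cons, PySem.Str.isIn_eq]
    by_cases h : PySem.Chars.isIn i.toList p.toList = true
    · simp [h]
    · have hb := eq_false_of_ne_true h
      simp only [PySem.Str.isIn_eq] at ih
      simp [hb, ih]

theorem pv_goA_eq (paths : List String) :
    pvGoA paths 0 = paths.any (fun p => pvIndicatorsA.any (fun i => PySem.Str.isIn i p)) := by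
  induction paths with
  | nil => simp [pvGoA]
  | cons p rest ih =>
    simp only [pvGoA, pv_innerA_eq, List.any_cons, PySem.Str.isIn_eq]
    by_cases h : (pvIndicatorsA.any (fun i => PySem.Chars.isIn i.toList p.toList)) = true
    · simp [h]
    · have hb := eq_false_of_ne_true h
      simp only [PySem.Str.isIn_eq] at ih
      simp [hb, ih]

theorem pvInds_eq : pvInds = pvIndicatorsA.map String.toList := by decide

theorem pv_goB_eq (paths : List String) :
    pvGoB paths = paths.any (fun p => pvIndicatorsA.any (fun i => PySem.Str.isIn i p)) := by
  induction paths with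
  | nil => simp [pvGoB]
  | cons p rest ih =>
    simp only [pvGoB, List.any_cons]
    have hpath : pvScanPath [] p.toList
        = pvIndicatorsA.any (fun i => PySem.Str.isIn i p) := by
      rw [Bool.eq_iff_iff, pvScanPath_iff]
      simp only [List.not_mem_nil, false_and, exists_false, false_or,
        List.any_eq_true, PySem.Str.isIn_eq, PySem.Chars.isIn_iff_infix, pvInds_eq,
        List.mem_map]
      constructor
      · rintro ⟨i, ⟨j, hj, rfl⟩, hinf⟩; exact ⟨j, hj, hinf⟩
      · rintro ⟨j, hj, hinf⟩; exact ⟨j.toList, ⟨j, hj, rfl⟩, hinf⟩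
    rw [hpath, ih]
    cases h : pvIndicatorsA.any (fun i => PySem.Str.isIn i p) <;> simp

-- ===== VERDICT (by name: the statement is the Claim_ definition above) =====
theorem has_required_infrastructure_py_spec : Claim_equal_has_required_infrastructure_py := by
  intro paths _
  unfold Spec_has_required_infrastructure_py has_required_infrastructure_py has_required_infrastructure_py_alt
  rw [pv_goA_eq, pv_goB_eq]
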